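-- pv_equiv track=rewrite | github.com/Sonypriyasonu/Python-Practice | OliviaGarden.py | garden
-- ===== SOURCE A (Python) =====
-- def garden(l):
--     s=0
--     k=0
--     m=min(l)
--     n=len(l)
--     for i in range(n):
--         k+=l[i]-m
--         if s<k:
--             s=k
--     return s
-- ===== SOURCE B (Python) =====
-- def garden(l):
--     # Every summand x - min(l) is nonnegative, so the prefix sums of
--     # (x - min(l)) are nondecreasing; their maximum is the full sum.
--     return sum(l) - len(l) * min(l)
-- ===== Notes on version B (the rewrite author's own statement) =====
-- stated objective: simpler
-- what changed: Replaces A's fused prefix-sum-plus-running-max loop by the closed form sum(l) - len(l)*min(l), justified by the observation that all increments x-min(l) are nonnegative so the prefix sums are monotone and their maximum is the total.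
-- outside the precondition, e.g. on garden([]): A raises ValueError, B raises ValueError
import Mathlib
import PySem

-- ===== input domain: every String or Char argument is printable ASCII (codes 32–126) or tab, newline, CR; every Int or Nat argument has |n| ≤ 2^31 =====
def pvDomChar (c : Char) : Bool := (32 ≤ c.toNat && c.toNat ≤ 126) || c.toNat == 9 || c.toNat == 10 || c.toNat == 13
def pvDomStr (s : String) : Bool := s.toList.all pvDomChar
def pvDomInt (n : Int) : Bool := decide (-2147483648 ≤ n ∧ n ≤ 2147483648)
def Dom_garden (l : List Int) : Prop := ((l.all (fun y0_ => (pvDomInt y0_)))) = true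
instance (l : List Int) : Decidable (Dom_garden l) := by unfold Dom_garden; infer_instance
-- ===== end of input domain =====

-- B replaces A's loop by the closed form sum(l) - len(l)*min(l): all increments x - min(l) are nonnegative, so the prefix sums are monotone and their maximum is the total.

-- ===== PORT A =====
def garden (l : List Int) : Int :=
  match PySem.List.min? l (fun x => x) with
  | none => 0   -- Python raises ValueError (min of empty); excluded by Pre_garden
  | some m =>
    let n := PySem.List.len l
    let p := (PySem.List.pyRange 0 n 1).foldl
      (fun (sk : Int × Int) i =>
        let k := sk.2 + PySem.List.pyGetD l i 0 - m
        let s := if sk.1 < k then k else sk.1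
        (s, k)) (0, 0)
    p.1

-- ===== PORT B =====
def garden_alt (l : List Int) : Int :=
  match PySem.List.min? l (fun x => x) with
  | none => 0   -- Python raises ValueError (min of empty); excluded by Pre_garden
  | some m => l.sum - PySem.List.len l * m

-- ===== PRECONDITION & SPEC =====
-- Python's min raises ValueError on an empty list, so A returns only on nonempty input.
def Pre_garden (l : List Int) : Prop := l ≠ []
instance (l : List Int) : Decidable (Pre_garden l) := by unfold Pre_garden; infer_instance
def pvWitness_garden : List Int := [3, 1, 2]

def Spec_garden (l : List Int) (out : Int) : Prop := out = garden_alt l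
instance (l : List Int) (out : Int) : Decidable (Spec_garden l out) := by unfold Spec_garden; infer_instance

-- ===== CLAIM =====
def Claim_equal_garden : Prop := ∀ (l : List Int), Dom_garden l → Pre_garden l → Spec_garden l (garden l)

-- ===== LEMMAS AND PROOFS =====

-- A's fused loop: when every element is ≥ m and the running max s is ≤ the running sum k,
-- the loop's final max equals k plus the total of (x - m) over the rest — the closed form.
theorem garden_fold_closed (m : Int) : ∀ (xs : List Int), (∀ x ∈ xs, m ≤ x) → ∀ (s k : Int), s = k →
    (xs.foldl (fun (sk : Int × Int) x =>
        let k' := sk.2 + x - m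
        let s' := if sk.1 < k' then k' else sk.1
        (s', k')) (s, k)).1
    = k + xs.sum - xs.length * m := by
  intro xs
  induction xs with
  | nil => intro _ s k hsk; simp [hsk]
  | cons x xs ih =>
    intro hall s k hsk
    simp only [List.foldl_cons]
    have hx : m ≤ x := hall x (by simp)
    have hk' : s ≤ k + x - m := by omega
    have hs' : (if s < k + x - m then k + x - m else s) = k + x - m := by
      split_ifs <;> omega
    rw [hs', ih (fun y hy => hall y (by simp [hy])) (k + x - m) (k + x - m) rfl]
    simp only [List.sum_cons, List.length_cons]
    push_cast
    ring

theorem garden_spec' (l : List Int) (h : Pre_garden l) : garden l = garden_alt l := by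
  unfold Pre_garden at h
  obtain ⟨m, hm⟩ : ∃ m, PySem.List.min? l (fun y => y) = some m :=
    Option.ne_none_iff_exists'.mp (by simp [PySem.List.min?_eq_none_iff, h])
  unfold garden garden_alt
  rw [hm]
  simp only []
  rw [PySem.List.foldl_pyRange_zero_pyGetD l 0
      (fun (sk : Int × Int) y =>
        let k' := sk.2 + y - m
        let s' := if sk.1 < k' then k' else sk.1
        (s', k')) ((0 : Int), (0 : Int))]
  rw [garden_fold_closed m l (fun x hx => PySem.List.min?_isMin hm x hx) 0 0 rfl]
  simp [PySem.List.len]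

-- ===== VERDICT =====
theorem garden_spec : Claim_equal_garden := by
  intro l _ hp
  exact garden_spec' l hp
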